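-- pv_equiv track=rewrite | github.com/suyashhaspowers/EpilespySafeViewerServer | anomalies_process.py | post_process_anomalies
-- ===== SOURCE A (Python) =====
-- def post_process_anomalies(anomalies):
--     anomalies_bucketed = []
--     sliding_window_size = 10
--     num_points = len(anomalies)
--
--     for i in range(num_points):
--         bucket_val = any(anomalies[max(0, i - sliding_window_size) : i])
--         anomalies_bucketed.append(bucket_val)
--     return anomalies_bucketed
-- ===== SOURCE B (Python) =====
-- def post_process_anomalies(anomalies):
--     anomalies_bucketed = []
--     last_true = None
--     for i, a in enumerate(anomalies):
--         anomalies_bucketed.append(last_true is not None and i - last_true <= 10)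
--         if a:
--             last_true = i
--     return anomalies_bucketed
-- ===== Notes on version B (the rewrite author's own statement) =====
-- stated objective: simpler
-- what changed: Replaces the per-index any() over a 10-wide slice with a single pass that tracks the index of the most recent truthy element and tests its distance from the current index.
import Mathlib
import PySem

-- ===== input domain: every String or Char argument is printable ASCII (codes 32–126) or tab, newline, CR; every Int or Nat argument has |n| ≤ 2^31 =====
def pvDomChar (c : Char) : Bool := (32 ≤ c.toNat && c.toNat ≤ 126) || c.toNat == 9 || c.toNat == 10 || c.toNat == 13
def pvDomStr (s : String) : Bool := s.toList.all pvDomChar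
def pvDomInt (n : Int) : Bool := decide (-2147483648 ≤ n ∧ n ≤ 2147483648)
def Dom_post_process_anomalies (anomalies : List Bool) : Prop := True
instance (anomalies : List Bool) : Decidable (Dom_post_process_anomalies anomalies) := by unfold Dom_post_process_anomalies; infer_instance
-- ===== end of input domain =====

-- B replaces A's per-index any() over a 10-wide slice by a single pass tracking the most
-- recent truthy index (objective: simpler single pass).

-- ===== PORT A =====
def post_process_anomalies (anomalies : List Bool) : List Bool :=
  let sliding_window_size : Int := 10
  let num_points : Int := (anomalies.length : Int)
  (PySem.List.pyRange 0 num_points 1).foldl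
    (fun acc i =>
      acc ++ [(PySem.List.slice anomalies (some (max 0 (i - sliding_window_size))) (some i)).any id])
    []

-- ===== PORT B =====
-- Source B's loop: emit the bucket for index i from last_true, then update last_true.
def pvAltLoop (xs : List Bool) (i : Nat) (last : Option Nat) : List Bool :=
  match xs with
  | [] => []
  | a :: rest =>
      (match last with | none => false | some lt => decide (i - lt ≤ 10)) ::
      pvAltLoop rest (i + 1) (if a then some i else last)

def post_process_anomalies_alt (anomalies : List Bool) : List Bool :=
  pvAltLoop anomalies 0 none

-- ===== PRECONDITION & SPEC =====
def Spec_post_process_anomalies (anomalies : List Bool) (out : List Bool) : Prop := out = post_process_anomalies_alt anomalies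
instance (anomalies : List Bool) (out : List Bool) : Decidable (Spec_post_process_anomalies anomalies out) := by unfold Spec_post_process_anomalies; infer_instance

-- ===== CLAIM (what is proved, stated in full; the proofs are below) =====
def Claim_equal_post_process_anomalies : Prop := ∀ (anomalies : List Bool), Dom_post_process_anomalies anomalies → Spec_post_process_anomalies anomalies (post_process_anomalies anomalies)

-- ===== LEMMAS AND PROOFS =====

-- index of the last truthy element strictly before k (proof-side characterisation of B's state)
def pvLastTrue (L : List Bool) : Nat → Option Nat
  | 0 => none
  | k+1 => if L.getD k false then some k else pvLastTrue L k

def pvB (L : List Bool) (j : Nat) : Bool :=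
  match pvLastTrue L j with | none => false | some lt => decide (j - lt ≤ 10)

lemma pvLastTrue_some {L : List Bool} {k j : Nat} (h : pvLastTrue L k = some j) :
    j < k ∧ L.getD j false = true := by
  induction k with
  | zero => simp [pvLastTrue] at h
  | succ k ih =>
    simp only [pvLastTrue] at h
    by_cases hk : L.getD k false = true
    · rw [if_pos hk] at h
      have hkj : k = j := by injection h
      subst hkj
      exact ⟨Nat.lt_succ_self k, hk⟩
    · rw [if_neg hk] at h
      rcases ih h with ⟨h1, h2⟩
      exact ⟨Nat.lt_succ_of_lt h1, h2⟩

lemma pvLastTrue_max {L : List Bool} {k m : Nat} (hm : m < k) (ht : L.getD m false = true) :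
    ∃ j, pvLastTrue L k = some j ∧ m ≤ j := by
  induction k with
  | zero => omega
  | succ k ih =>
    by_cases hk : L.getD k false = true
    · exact ⟨k, by simp only [pvLastTrue]; rw [if_pos hk], by omega⟩
    · have hmk : m < k := by
        rcases Nat.lt_succ_iff_lt_or_eq.mp hm with h | h
        · exact h
        · subst h; exact absurd ht hk
      rcases ih hmk with ⟨j, hj, hmj⟩
      exact ⟨j, by simp only [pvLastTrue]; rw [if_neg hk]; exact hj, hmj⟩

lemma pvB_eq_true_iff (L : List Bool) (j : Nat) :
    pvB L j = true ↔ ∃ m, j - 10 ≤ m ∧ m < j ∧ L.getD m false = true := by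
  constructor
  · intro h
    unfold pvB at h
    cases hlt : pvLastTrue L j with
    | none => simp [hlt] at h
    | some lt =>
      simp [hlt] at h
      rcases pvLastTrue_some hlt with ⟨h1, h2⟩
      exact ⟨lt, by omega, h1, h2⟩
  · rintro ⟨m, hm1, hm2, hm3⟩
    rcases pvLastTrue_max hm2 hm3 with ⟨j', hj', hmj⟩
    have hlt := (pvLastTrue_some hj').1
    unfold pvB
    rw [hj']
    simp
    omega

lemma pv_any_drop_take (L : List Bool) (a b : Nat) :
    ((L.drop a).take b).any id = true ↔ ∃ m, a ≤ m ∧ m < a + b ∧ L.getD m false = true := by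
  rw [List.any_eq_true]
  constructor
  · rintro ⟨x, hx, hxt⟩
    simp only [id] at hxt; subst hxt
    rw [List.mem_take_iff_getElem] at hx
    rcases hx with ⟨i, hi, hgi⟩
    refine ⟨a + i, by omega, ?_, ?_⟩
    · have := List.length_drop (l := L) (i := a); omega
    · rw [List.getElem_drop] at hgi
      rw [List.getD_eq_getElem]
      exact hgi
  · rintro ⟨m, hm1, hm2, hm3⟩
    have hml : m < L.length := by
      by_contra h
      rw [List.getD_eq_default] at hm3
      · simp at hm3
      · omega
    refine ⟨true, ?_, rfl⟩
    rw [List.mem_take_iff_getElem]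
    refine ⟨m - a, ?_, ?_⟩
    · simp; omega
    · rw [List.getElem_drop]
      have : a + (m - a) = m := by omega
      rw [List.getD_eq_getElem L false hml] at hm3
      simp [this, hm3]

lemma pv_window_eq_pvB (L : List Bool) (j : Nat) :
    ((L.drop (j - 10)).take (min j 10)).any id = pvB L j := by
  have h1 := pv_any_drop_take L (j - 10) (min j 10)
  have h2 := pvB_eq_true_iff L j
  have hsum : j - 10 + min j 10 = j := by omega
  rw [hsum] at h1
  cases hA : ((L.drop (j - 10)).take (min j 10)).any id
  · cases hB : pvB L j
    · rfl
    · exfalso; rw [hA] at h1; rw [hB] at h2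
      rcases h2.mp rfl with ⟨m, hm⟩
      have := h1.mpr ⟨m, hm⟩; simp at this
  · cases hB : pvB L j
    · exfalso; rw [hA] at h1; rw [hB] at h2
      rcases h1.mp rfl with ⟨m, hm⟩
      have := h2.mpr ⟨m, hm⟩; simp at this
    · rfl

lemma pv_slice_win (L : List Bool) (j : Nat) :
    PySem.List.slice L (some (max 0 ((j : Int) - 10))) (some (j : Int))
      = (L.drop (j - 10)).take (min j 10) := by
  rw [PySem.List.slice_toNat L (by omega) (by omega)]
  have h1 : (max 0 ((j : Int) - 10)).toNat = j - 10 := by omega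
  have h2 : (j : Int).toNat = j := by omega
  rw [h1, h2]
  congr 1
  omega

lemma pvAltLoop_eq (L : List Bool) :
    ∀ (xs : List Bool) (k : Nat), xs = L.drop k →
      pvAltLoop xs k (pvLastTrue L k) = (List.range' k xs.length).map (pvB L) := by
  intro xs
  induction xs with
  | nil => intro k _; simp [pvAltLoop]
  | cons a rest ih =>
    intro k hxs
    have hgk : L[k]? = some a := by
      have : (L.drop k)[0]? = some a := by rw [← hxs]; rfl
      simpa using this
    have ha : L.getD k false = a := by simp [List.getD_eq_getElem?_getD, hgk]
    have hrest : rest = L.drop (k + 1) := by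
      have : (L.drop k).tail = rest := by rw [← hxs]; rfl
      rw [← this, List.tail_drop]
    have hupd : (if a then some k else pvLastTrue L k) = pvLastTrue L (k + 1) := by
      simp only [pvLastTrue]
      rw [ha]
    simp only [pvAltLoop, List.length_cons, List.range'_succ, List.map_cons, hupd,
      ih (k + 1) hrest]
    rfl

-- ===== VERDICT (by name: the statement is the Claim_ definition above) =====
theorem post_process_anomalies_spec : Claim_equal_post_process_anomalies := by
  intro L _
  unfold Spec_post_process_anomalies post_process_anomalies post_process_anomalies_alt
  simp only []
  rw [PySem.List.foldl_append_singleton_eq_map, PySem.List.pyRange_zero_natCast,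
    List.map_map]
  have hmap : ∀ j : Nat,
      (PySem.List.slice L (some (max 0 ((j : Int) - 10))) (some (j : Int))).any id
        = pvB L j := by
    intro j
    rw [pv_slice_win, pv_window_eq_pvB]
  have h0 := pvAltLoop_eq L L 0 (by simp)
  simp only [pvLastTrue] at h0
  rw [h0, List.range_eq_range']
  exact List.map_congr_left (fun j _ => hmap j)
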